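-- pv_equiv track=rewrite | github.com/Maksim-Goncharovskiy/ITAM_python_cource_22 | homework/chapter-2/2-B.py | key_difference
-- ===== SOURCE A (Python) =====
-- def key_difference(dict1, dict2):
--     ans = {}
--     for i in dict1.keys():
--         if (i in dict2.keys()):
--             if (dict1[i] == dict2[i]):
--                 ans[i] = "equal"
--             else:
--                 ans[i] = "changed"
--         else:
--             ans[i] = "deleted"
--     for j in dict2.keys():
--         if not(j in dict1.keys()):
--             ans[j] = "added"
--     return ans
-- ===== SOURCE B (Python) =====
-- def key_difference(dict1, dict2):
--     # Sort both key lists, classify every key by a two-pointer merge of the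
--     # sorted lists, then emit the labels in dict1-then-dict2 insertion order.
--     label = {}
--     ks1 = sorted(dict1)
--     ks2 = sorted(dict2)
--     while ks1 and ks2:
--         if ks1[0] == ks2[0]:
--             k = ks1[0]
--             label[k] = "equal" if dict1[k] == dict2[k] else "changed"
--             ks1 = ks1[1:]
--             ks2 = ks2[1:]
--         elif ks1[0] < ks2[0]:
--             label[ks1[0]] = "deleted"
--             ks1 = ks1[1:]
--         else:
--             label[ks2[0]] = "added"
--             ks2 = ks2[1:]
--     for k in ks1:
--         label[k] = "deleted"
--     for k in ks2:
--         label[k] = "added"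
--     ans = {k: label[k] for k in dict1}
--     for k in dict2:
--         if label[k] == "added":
--             ans[k] = "added"
--     return ans
-- ===== Notes on version B (the rewrite author's own statement) =====
-- stated objective: alternative
-- what changed: Replaces A's per-key hash-membership probes with a sort-then-merge classifier: both key lists are sorted and a two-pointer merge of the sorted lists assigns equal/changed/deleted/added labels, which are then emitted in dict1-then-added-dict2 insertion order.
import Mathlib
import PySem

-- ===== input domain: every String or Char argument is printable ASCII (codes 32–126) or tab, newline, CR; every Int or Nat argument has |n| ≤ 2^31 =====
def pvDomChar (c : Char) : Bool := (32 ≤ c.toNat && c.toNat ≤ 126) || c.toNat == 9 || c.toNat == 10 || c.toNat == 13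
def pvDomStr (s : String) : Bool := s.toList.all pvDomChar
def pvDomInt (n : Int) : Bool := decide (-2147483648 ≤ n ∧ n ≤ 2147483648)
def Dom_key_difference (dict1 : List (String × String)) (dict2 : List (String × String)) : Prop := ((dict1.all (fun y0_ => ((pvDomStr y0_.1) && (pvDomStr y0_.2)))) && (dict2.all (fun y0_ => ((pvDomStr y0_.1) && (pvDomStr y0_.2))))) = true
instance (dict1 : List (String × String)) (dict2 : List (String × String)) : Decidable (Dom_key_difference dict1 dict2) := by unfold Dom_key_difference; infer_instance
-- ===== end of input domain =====

-- B replaces A's per-key hash-membership probes by a sort-then-merge classifier: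
-- a two-pointer merge of the two sorted key lists assigns the labels, which are then
-- emitted in dict1-then-added-dict2 insertion order (objective: alternative algorithm).

-- ===== PORT A =====
def key_difference (dict1 : List (String × String)) (dict2 : List (String × String)) : List (String × String) :=
  let d1 := PySem.Dict.ofList dict1
  let d2 := PySem.Dict.ofList dict2
  let ans : PySem.Dict String String :=
    d1.keys.foldl (fun ans i =>
      if d2.contains i then
        -- dict1[i] / dict2[i]: i is a key of both dicts here, so getD's default is never used
        if d1.getD i "" == d2.getD i "" then ans.insert i "equal"
        else ans.insert i "changed"
      else ans.insert i "deleted") PySem.Dict.empty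
  let ans := d2.keys.foldl (fun ans j =>
      if !(d1.contains j) then ans.insert j "added" else ans) ans
  ans.items

-- ===== PORT B =====
-- the 'while ks1 and ks2' two-pointer merge, followed by the two trailing for-loops
-- ('deleted' over the rest of ks1, 'added' over the rest of ks2) in its base cases
def mergeLabels (d1 d2 : PySem.Dict String String) :
    List String → List String → PySem.Dict String String → PySem.Dict String String
  | [], ks2, lab => ks2.foldl (fun a k => a.insert k "added") lab
  | k1 :: t1, [], lab => (k1 :: t1).foldl (fun a k => a.insert k "deleted") lab
  | k1 :: t1, k2 :: t2, lab =>
    if k1 == k2 then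
      -- dict1[k] / dict2[k]: k is a key of both dicts, so getD's default is never used
      mergeLabels d1 d2 t1 t2
        (lab.insert k1 (if d1.getD k1 "" == d2.getD k1 "" then "equal" else "changed"))
    else if k1 < k2 then
      mergeLabels d1 d2 t1 (k2 :: t2) (lab.insert k1 "deleted")
    else
      mergeLabels d1 d2 (k1 :: t1) t2 (lab.insert k2 "added")
  termination_by ks1 ks2 _ => ks1.length + ks2.length

def key_difference_alt (dict1 : List (String × String)) (dict2 : List (String × String)) : List (String × String) :=
  let d1 := PySem.Dict.ofList dict1
  let d2 := PySem.Dict.ofList dict2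
  let ks1 := PySem.List.sorted d1.keys (fun x => x) false
  let ks2 := PySem.List.sorted d2.keys (fun x => x) false
  let label := mergeLabels d1 d2 ks1 ks2 PySem.Dict.empty
  -- ans = {k: label[k] for k in dict1}; label[k] is present for every such k
  let ans : PySem.Dict String String :=
    d1.keys.foldl (fun a k => a.insert k (label.getD k "")) PySem.Dict.empty
  let ans := d2.keys.foldl (fun a k =>
      if label.getD k "" == "added" then a.insert k "added" else a) ans
  ans.items

-- ===== PRECONDITION & SPEC =====
def Spec_key_difference (dict1 : List (String × String)) (dict2 : List (String × String)) (out : List (String × String)) : Prop := out = key_difference_alt dict1 dict2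
instance (dict1 : List (String × String)) (dict2 : List (String × String)) (out : List (String × String)) : Decidable (Spec_key_difference dict1 dict2 out) := by unfold Spec_key_difference; infer_instance

-- ===== CLAIM (what is proved, stated in full; the proofs are below) =====
def Claim_equal_key_difference : Prop := ∀ (dict1 : List (String × String)) (dict2 : List (String × String)), Dom_key_difference dict1 dict2 → Spec_key_difference dict1 dict2 (key_difference dict1 dict2)

-- ===== LEMMAS AND PROOFS =====
def pvLabel (d1 d2 : PySem.Dict String String) (i : String) : String :=
  if d2.contains i then
    (if d1.getD i "" == d2.getD i "" then "equal" else "changed")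
  else "deleted"

def canonical (d1 d2 : PySem.Dict String String) : List (String × String) :=
  d1.keys.map (fun i => (i, pvLabel d1 d2 i))
    ++ (d2.keys.filter (fun j => !(d1.contains j))).map (fun j => (j, "added"))

theorem itemsA_eq (dict1 dict2 : List (String × String)) :
    key_difference dict1 dict2
    = canonical (PySem.Dict.ofList dict1) (PySem.Dict.ofList dict2) := by
  unfold key_difference
  set d1 := PySem.Dict.ofList dict1 with hd1
  set d2 := PySem.Dict.ofList dict2 with hd2
  have h1 : d1.keys.Nodup := PySem.Dict.nodup_keys_ofList dict1
  have h2 : d2.keys.Nodup := PySem.Dict.nodup_keys_ofList dict2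
  show (d2.keys.foldl (fun ans j => if !(d1.contains j) then ans.insert j "added" else ans)
      (d1.keys.foldl _ PySem.Dict.empty)).items = _
  have efun : (fun (ans : PySem.Dict String String) i =>
      if d2.contains i then
        if d1.getD i "" == d2.getD i "" then ans.insert i "equal"
        else ans.insert i "changed"
      else ans.insert i "deleted")
     = (fun ans i => ans.insert i (pvLabel d1 d2 i)) := by
    funext a i; unfold pvLabel; split_ifs <;> rfl
  rw [efun]
  have hAmid : (d1.keys.foldl (fun a i => a.insert i (pvLabel d1 d2 i)) PySem.Dict.empty).items
      = d1.keys.map (fun i => (i, pvLabel d1 d2 i)) := by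
    have := PySem.Dict.items_foldl_insert_fresh d1.keys id (fun i => pvLabel d1 d2 i)
      PySem.Dict.empty (by intro a _; simp) (by simpa using h1)
    simpa using this
  have hAmidkeys : (d1.keys.foldl (fun a i => a.insert i (pvLabel d1 d2 i)) PySem.Dict.empty).keys
      = d1.keys := by
    show ((d1.keys.foldl (fun a i => a.insert i (pvLabel d1 d2 i)) PySem.Dict.empty).items).map (·.1) = _
    rw [hAmid, List.map_map]
    simp [Function.comp_def]
  have hsplit := PySem.List.foldl_if_eq_foldl_filter (fun j => !(d1.contains j))
      (fun (a : PySem.Dict String String) j => a.insert j "added") d2.keys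
      (d1.keys.foldl (fun a i => a.insert i (pvLabel d1 d2 i)) PySem.Dict.empty)
  beta_reduce at hsplit
  rw [hsplit]
  have hfresh := PySem.Dict.items_foldl_insert_fresh
      (d2.keys.filter (fun j => !(d1.contains j))) (fun j => j) (fun _ => "added")
      (d1.keys.foldl (fun a i => a.insert i (pvLabel d1 d2 i)) PySem.Dict.empty)
      (by
        intro j hj
        have hmem := List.mem_filter.mp hj
        have hnc : ¬ (j ∈ d1.keys) := by
          intro hk
          have := (PySem.Dict.contains_iff_mem_keys d1 j).mpr hk
          simp [this] at hmem
        cases hc : (d1.keys.foldl (fun a i => a.insert i (pvLabel d1 d2 i)) PySem.Dict.empty).contains j with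
        | false => rfl
        | true =>
          exact absurd (hAmidkeys ▸ (PySem.Dict.contains_iff_mem_keys _ _).mp hc) hnc)
      (by simpa using h2.filter _)
  beta_reduce at hfresh
  rw [hfresh, hAmid]
  simp [canonical]

theorem getD_foldl_insert_const (c : String) (l : List String)
    (lab : PySem.Dict String String) (k : String) :
    (l.foldl (fun a x => a.insert x c) lab).getD k ""
      = if k ∈ l then c else lab.getD k "" := by
  induction l generalizing lab with
  | nil => simp
  | cons h t ih =>
    simp only [List.foldl_cons, ih, PySem.Dict.getD_insert, List.mem_cons]
    by_cases hk : k ∈ t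
    · simp [hk]
    · by_cases he : k = h <;> simp [he, hk]

theorem mergeLabels_getD (d1 d2 : PySem.Dict String String)
    (ks1 ks2 : List String) (lab : PySem.Dict String String) (k : String) :
    ks1.Pairwise (· < ·) → ks2.Pairwise (· < ·) →
    (mergeLabels d1 d2 ks1 ks2 lab).getD k "" =
      if k ∈ ks1 then
        (if k ∈ ks2 then
          (if d1.getD k "" == d2.getD k "" then "equal" else "changed")
         else "deleted")
      else if k ∈ ks2 then "added" else lab.getD k "" := by
  induction ks1, ks2, lab using mergeLabels.induct d1 d2 with
  | case1 ks2 lab =>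
    intro _ _
    simp [mergeLabels, getD_foldl_insert_const]
  | case2 k1 t1 lab =>
    intro _ _
    rw [mergeLabels, getD_foldl_insert_const]
    simp
  | case3 k1 t1 k2 t2 lab heq ih =>
    intro h1 h2
    have hk12 : k1 = k2 := by simpa using heq
    have hlt1 : ∀ x ∈ t1, k1 < x := (List.pairwise_cons.mp h1).1
    have hlt2 : ∀ x ∈ t2, k2 < x := (List.pairwise_cons.mp h2).1
    simp only [dite_eq_ite] at ih
    rw [mergeLabels, if_pos heq]
    rw [ih (List.pairwise_cons.mp h1).2 (List.pairwise_cons.mp h2).2]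
    by_cases hk : k = k1
    · subst hk
      subst hk12
      have hn1 : k ∉ t1 := fun hm => lt_irrefl k (hlt1 k hm)
      have hn2 : k ∉ t2 := fun hm => lt_irrefl k (hlt2 k hm)
      simp [hn1, hn2]
    · have hk2 : ¬ (k = k2) := hk12 ▸ hk
      simp [List.mem_cons, hk, hk2, PySem.Dict.getD_insert]
  | case4 k1 t1 k2 t2 lab heq hlt ih =>
    intro h1 h2
    have hlt1 : ∀ x ∈ t1, k1 < x := (List.pairwise_cons.mp h1).1
    have hlt2 : ∀ x ∈ t2, k2 < x := (List.pairwise_cons.mp h2).1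
    have hn2 : k1 ∉ k2 :: t2 := by
      intro hm
      rcases List.mem_cons.mp hm with h | h
      · exact lt_irrefl k1 (h ▸ hlt)
      · exact lt_irrefl k1 (lt_trans hlt (hlt2 _ h))
    rw [mergeLabels, if_neg (by simpa using heq), if_pos hlt]
    rw [ih (List.pairwise_cons.mp h1).2 h2]
    by_cases hk : k = k1
    · subst hk
      have hn1 : k ∉ t1 := fun hm => lt_irrefl k (hlt1 k hm)
      have hne2 : ¬ (k = k2) := fun h => lt_irrefl k (h ▸ hlt)
      have hnt2 : k ∉ t2 := fun hm => lt_irrefl k (lt_trans hlt (hlt2 _ hm))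
      simp [hn1, hne2, hnt2]
    · simp [List.mem_cons, hk, PySem.Dict.getD_insert]
  | case5 k1 t1 k2 t2 lab heq hnlt ih =>
    intro h1 h2
    have hne : k1 ≠ k2 := by simpa using heq
    have hgt : k2 < k1 := (lt_or_gt_of_ne hne).resolve_left hnlt
    have hlt1 : ∀ x ∈ t1, k1 < x := (List.pairwise_cons.mp h1).1
    have hlt2 : ∀ x ∈ t2, k2 < x := (List.pairwise_cons.mp h2).1
    have hn1 : k2 ∉ k1 :: t1 := by
      intro hm
      rcases List.mem_cons.mp hm with h | h
      · exact hne h.symm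
      · exact absurd (lt_trans hgt (hlt1 _ h)) (lt_irrefl k2)
    rw [mergeLabels, if_neg (by simpa using heq), if_neg hnlt]
    rw [ih h1 (List.pairwise_cons.mp h2).2]
    by_cases hk : k = k2
    · subst hk
      have hne1 : ¬ (k = k1) := fun h => hne (h ▸ rfl)
      have hnt1 : k ∉ t1 := fun hm => lt_irrefl k (lt_trans hgt (hlt1 _ hm))
      have hnt2 : k ∉ t2 := fun hm => lt_irrefl k (hlt2 k hm)
      simp [hne1, hnt1, hnt2]
    · simp [List.mem_cons, hk, PySem.Dict.getD_insert]

theorem itemsB_eq (dict1 dict2 : List (String × String)) :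
    key_difference_alt dict1 dict2
    = canonical (PySem.Dict.ofList dict1) (PySem.Dict.ofList dict2) := by
  unfold key_difference_alt
  set d1 := PySem.Dict.ofList dict1 with hd1
  set d2 := PySem.Dict.ofList dict2 with hd2
  have h1 : d1.keys.Nodup := PySem.Dict.nodup_keys_ofList dict1
  have h2 : d2.keys.Nodup := PySem.Dict.nodup_keys_ofList dict2
  set ks1 := PySem.List.sorted d1.keys (fun x => x) false with hks1
  set ks2 := PySem.List.sorted d2.keys (fun x => x) false with hks2
  have hp1 : ks1.Pairwise (· < ·) := by
    have := PySem.List.sorted_ofList_pairwise_lt (xs := d1.keys)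
    rwa [PySem.Set.ofList_eq_self_of_nodup d1.keys h1] at this
  have hp2 : ks2.Pairwise (· < ·) := by
    have := PySem.List.sorted_ofList_pairwise_lt (xs := d2.keys)
    rwa [PySem.Set.ofList_eq_self_of_nodup d2.keys h2] at this
  set label := mergeLabels d1 d2 ks1 ks2 PySem.Dict.empty with hlabdef
  have hlab : ∀ k, label.getD k "" =
      if k ∈ d1.keys then
        (if k ∈ d2.keys then
          (if d1.getD k "" == d2.getD k "" then "equal" else "changed")
         else "deleted")
      else if k ∈ d2.keys then "added" else "" := by
    intro k
    rw [hlabdef, mergeLabels_getD d1 d2 ks1 ks2 PySem.Dict.empty k hp1 hp2]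
    simp only [hks1, hks2, PySem.List.mem_sorted, PySem.Dict.getD_empty]
  have hlab1 : ∀ k ∈ d1.keys, label.getD k "" = pvLabel d1 d2 k := by
    intro k hk
    rw [hlab k, if_pos hk]
    unfold pvLabel
    by_cases hc : d2.contains k = true
    · simp [(PySem.Dict.contains_iff_mem_keys d2 k).mp hc, hc]
    · have hm : k ∉ d2.keys := fun hm => hc ((PySem.Dict.contains_iff_mem_keys d2 k).mpr hm)
      simp [hm, hc]
  have hlab2 : ∀ k ∈ d2.keys, (label.getD k "" == "added") = !(d1.contains k) := by
    intro k hk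
    rw [hlab k]
    by_cases hc : d1.contains k = true
    · have hm1 : k ∈ d1.keys := (PySem.Dict.contains_iff_mem_keys d1 k).mp hc
      rw [if_pos hm1, if_pos hk, hc]
      by_cases he : (d1.getD k "" == d2.getD k "") = true <;> simp [he]
    · have hm1 : k ∉ d1.keys := fun hm => hc ((PySem.Dict.contains_iff_mem_keys d1 k).mpr hm)
      rw [if_neg hm1, if_pos hk]
      simp [Bool.not_eq_true] at hc
      simp [hc]
  show (d2.keys.foldl (fun a k => if label.getD k "" == "added" then a.insert k "added" else a)
      (d1.keys.foldl (fun a k => a.insert k (label.getD k "")) PySem.Dict.empty)).items = _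
  have hmid : (d1.keys.foldl (fun a k => a.insert k (label.getD k "")) PySem.Dict.empty).items
      = d1.keys.map (fun k => (k, pvLabel d1 d2 k)) := by
    have h0 : (d1.keys.foldl (fun a k => a.insert k (label.getD k "")) PySem.Dict.empty).items
        = d1.keys.map (fun k => (k, label.getD k "")) := by
      have := PySem.Dict.items_foldl_insert_fresh d1.keys id (fun k => label.getD k "")
        PySem.Dict.empty (by intro a _; simp) (by simpa using h1)
      simpa using this
    rw [h0]
    apply List.map_congr_left
    intro k hk
    rw [hlab1 k hk]
  have hmidkeys : (d1.keys.foldl (fun a k => a.insert k (label.getD k "")) PySem.Dict.empty).keys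
      = d1.keys := by
    show ((d1.keys.foldl (fun a k => a.insert k (label.getD k "")) PySem.Dict.empty).items).map (·.1) = _
    rw [hmid, List.map_map]
    simp [Function.comp_def]
  have hsplit := PySem.List.foldl_if_eq_foldl_filter (fun k => label.getD k "" == "added")
      (fun (a : PySem.Dict String String) k => a.insert k "added") d2.keys
      (d1.keys.foldl (fun a k => a.insert k (label.getD k "")) PySem.Dict.empty)
  beta_reduce at hsplit
  rw [hsplit]
  have hfilter : d2.keys.filter (fun k => label.getD k "" == "added")
      = d2.keys.filter (fun j => !(d1.contains j)) :=
    List.filter_congr (fun j hj => hlab2 j hj)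
  rw [hfilter]
  have hfresh := PySem.Dict.items_foldl_insert_fresh
      (d2.keys.filter (fun j => !(d1.contains j))) (fun j => j) (fun _ => "added")
      (d1.keys.foldl (fun a k => a.insert k (label.getD k "")) PySem.Dict.empty)
      (by
        intro j hj
        have hmem := List.mem_filter.mp hj
        have hnc : ¬ (j ∈ d1.keys) := by
          intro hk
          have := (PySem.Dict.contains_iff_mem_keys d1 j).mpr hk
          simp [this] at hmem
        cases hc : (d1.keys.foldl (fun a k => a.insert k (label.getD k "")) PySem.Dict.empty).contains j with
        | false => rfl
        | true =>
          exact absurd (hmidkeys ▸ (PySem.Dict.contains_iff_mem_keys _ _).mp hc) hnc)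
      (by simpa using h2.filter _)
  beta_reduce at hfresh
  rw [hfresh, hmid]
  simp [canonical]

-- ===== VERDICT (by name: the statement is the Claim_ definition above) =====
theorem key_difference_spec : Claim_equal_key_difference := by
  intro dict1 dict2 _
  unfold Spec_key_difference
  exact (itemsA_eq dict1 dict2).trans (itemsB_eq dict1 dict2).symm
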